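-- pv_equiv track=rewrite | github.com/MarcosSchlickmann/Character-Level-LSTM-for-Parameter-Injection-Detection | log_parser/log_parser.py | request_list_to_str
-- ===== SOURCE A (Python) =====
-- def request_list_to_str(lines: list):
--     available_methods = ['GET', 'POST', 'PUT']
--     res = []
--     for i in range(len(lines)):
--         line = lines[i].strip().split(' ')
--         if line[0] not in available_methods:
--             continue
--
--         url = line[0] + line[1]
--
--         if line[0] == "POST" or line[0] == "PUT":
--             url += '?' + get_body_of_request(lines, i);
--
--         res.append(url.lower())
--
--     return res
--
-- def get_body_of_request(lines: list, start_line: int):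
--     j = 1
--     while True:
--         if lines[start_line + j].startswith("Content-Length"):
--             break
--         j += 1
--     j += 1
--     data = lines[start_line + j + 1].strip()
--     return data
-- ===== SOURCE B (Python) =====
-- def request_list_to_str(lines: list):
--     # One backward pass precomputes, for every position, the index of the next
--     # "Content-Length" line at-or-after it; each request then consults that table.
--     n = len(lines)
--     next_cl = [None] * (n + 1)
--     for i in range(n - 1, -1, -1):
--         next_cl[i] = i if lines[i].startswith("Content-Length") else next_cl[i + 1]
--     res = []
--     for i, raw in enumerate(lines):
--         toks = raw.strip().split(' ')
--         m = toks[0]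
--         if m == 'GET':
--             res.append((m + toks[1]).lower())
--         elif m == 'POST' or m == 'PUT':
--             cl = next_cl[i + 1]
--             res.append((m + toks[1] + '?' + lines[cl + 2].strip()).lower())
--     return res
-- ===== Notes on version B (the rewrite author's own statement) =====
-- stated objective: alternative
-- what changed: B replaces A's per-request forward rescan for the Content-Length line (get_body_of_request) by a single backward pass that precomputes, for every position, the index of the next Content-Length line, which each POST/PUT request then consults directly.
import Mathlib
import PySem

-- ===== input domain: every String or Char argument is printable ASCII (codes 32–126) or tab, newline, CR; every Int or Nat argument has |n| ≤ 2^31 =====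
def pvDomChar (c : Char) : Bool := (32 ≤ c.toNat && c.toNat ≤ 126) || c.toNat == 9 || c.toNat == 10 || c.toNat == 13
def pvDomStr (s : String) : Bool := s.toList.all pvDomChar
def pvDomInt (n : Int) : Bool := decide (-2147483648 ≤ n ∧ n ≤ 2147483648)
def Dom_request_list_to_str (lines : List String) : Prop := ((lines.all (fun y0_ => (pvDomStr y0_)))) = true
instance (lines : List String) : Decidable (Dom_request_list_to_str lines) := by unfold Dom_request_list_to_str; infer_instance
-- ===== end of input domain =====

-- B replaces A's per-request forward scan for the "Content-Length" line by one
-- backward precomputation pass (next_cl array) consulted at each request (alternative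
-- algorithm). Pre_ excludes exactly the inputs on which the Python A raises IndexError.

-- tokens of line.strip().split(' '), on the char-list side
def pvToks (s : String) : List (List Char) :=
  PySem.Chars.splitOn (PySem.Chars.strip s.toList) [' ']

-- ===== PORT A =====
-- forward scan: first index ≥ k (k = absolute index of the suffix head) starting with "Content-Length"
def pvFindCL : List String → Nat → Option Nat
  | [], _ => none
  | s :: rest, k =>
    if PySem.Chars.startswith s.toList "Content-Length".toList then some k
    else pvFindCL rest (k + 1)

-- get_body_of_request: scan forward from start+1 for "Content-Length", take the line two further on
def pvGetBody (lines : List String) (start : Nat) : Option (List Char) :=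
  match pvFindCL (lines.drop (start + 1)) (start + 1) with
  | none => none
  | some m => (lines[m + 2]?).map (fun s => PySem.Chars.strip s.toList)

def pvGoA (lines : List String) : List String → Nat → List String → Option (List String)
  | [], _, res => some res.reverse
  | s :: rest, i, res =>
    match pvToks s with
    | [] => none   -- unreachable: split(' ') is never empty
    | t0 :: ts =>
      if t0 = "GET".toList ∨ t0 = "POST".toList ∨ t0 = "PUT".toList then
        match ts with
        | [] => none  -- IndexError: line[1]
        | t1 :: _ =>
          if t0 = "POST".toList ∨ t0 = "PUT".toList then
            match pvGetBody lines i with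
            | none => none  -- IndexError in get_body_of_request
            | some d =>
              pvGoA lines rest (i + 1)
                (String.ofList (PySem.Chars.lower (t0 ++ t1 ++ ['?'] ++ d)) :: res)
          else
            pvGoA lines rest (i + 1) (String.ofList (PySem.Chars.lower (t0 ++ t1)) :: res)
      else
        pvGoA lines rest (i + 1) res

def request_list_to_str (lines : List String) : List String :=
  (pvGoA lines lines 0 []).getD []

-- ===== PORT B =====
-- next_cl array of Source B, built by the backward pass: entry j = first index ≥ j whose
-- line starts with "Content-Length" (length = lines.length + 1, last entry none)
def pvNextCL : List String → Nat → List (Option Nat)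
  | [], _ => [none]
  | s :: rest, i =>
    let tail := pvNextCL rest (i + 1)
    (if PySem.Chars.startswith s.toList "Content-Length".toList then some i
     else tail.getD 0 none) :: tail

def pvGoB (lines : List String) (nxt : List (Option Nat)) :
    List String → Nat → List String → Option (List String)
  | [], _, res => some res.reverse
  | raw :: rest, i, res =>
    match pvToks raw with
    | [] => none
    | t0 :: ts =>
      if t0 = "GET".toList then
        match ts with
        | [] => none
        | t1 :: _ =>
          pvGoB lines nxt rest (i + 1) (String.ofList (PySem.Chars.lower (t0 ++ t1)) :: res)
      else if t0 = "POST".toList ∨ t0 = "PUT".toList then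
        match ts with
        | [] => none
        | t1 :: _ =>
          match nxt.getD (i + 1) none with
          | none => none   -- next_cl[i+1] is None: TypeError in Source B
          | some cl =>
            match lines[cl + 2]? with
            | none => none  -- IndexError
            | some body =>
              pvGoB lines nxt rest (i + 1)
                (String.ofList (PySem.Chars.lower (t0 ++ t1 ++ ['?'] ++ PySem.Chars.strip body.toList)) :: res)
      else pvGoB lines nxt rest (i + 1) res

def request_list_to_str_alt (lines : List String) : List String :=
  (pvGoB lines (pvNextCL lines 0) lines 0 []).getD []

-- ===== PRECONDITION & SPEC =====
-- Pre_ excludes exactly the inputs on which A raises IndexError: a method line without a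
-- second token, or a POST/PUT line with no "Content-Length" line after it, or whose first
-- "Content-Length" line is not followed by at least two further lines.
def Pre_request_list_to_str (lines : List String) : Prop :=
  ∀ i < lines.length,
    ((pvToks (lines.getD i "")).getD 0 [] = "GET".toList ∨
     (pvToks (lines.getD i "")).getD 0 [] = "POST".toList ∨
     (pvToks (lines.getD i "")).getD 0 [] = "PUT".toList) →
      2 ≤ (pvToks (lines.getD i "")).length ∧
      (((pvToks (lines.getD i "")).getD 0 [] = "POST".toList ∨
        (pvToks (lines.getD i "")).getD 0 [] = "PUT".toList) →
        ∃ m < lines.length, i < m ∧ m + 2 < lines.length ∧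
          PySem.Chars.startswith (lines.getD m "").toList "Content-Length".toList = true ∧
          ∀ m' < m, i < m' →
            PySem.Chars.startswith (lines.getD m' "").toList "Content-Length".toList = false)
instance (lines : List String) : Decidable (Pre_request_list_to_str lines) := by
  unfold Pre_request_list_to_str; apply Nat.decidableBallLT

def pvWitness_request_list_to_str : List String :=
  ["GET /index.html HTTP/1.1", "POST /login HTTP/1.1", "Content-Length: 6", "", "user=a"]

def Spec_request_list_to_str (lines : List String) (out : List String) : Prop := out = request_list_to_str_alt lines
instance (lines : List String) (out : List String) : Decidable (Spec_request_list_to_str lines out) := by unfold Spec_request_list_to_str; infer_instance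

-- ===== CLAIM (what is proved, stated in full; the proofs are below) =====
def Claim_equal_request_list_to_str : Prop := ∀ (lines : List String), Dom_request_list_to_str lines → Pre_request_list_to_str lines → Spec_request_list_to_str lines (request_list_to_str lines)

-- ===== LEMMAS AND PROOFS =====

-- the precomputed array agrees with A's forward scan, at every position (also past the end)
theorem pvNextCL_getD (ls : List String) (k j : Nat) :
    (pvNextCL ls k).getD j none = pvFindCL (ls.drop j) (k + j) := by
  induction ls generalizing k j with
  | nil => simp [pvNextCL, pvFindCL]
  | cons s rest ih =>
    cases j with
    | zero =>
      simp only [pvNextCL, List.drop_zero, Nat.add_zero, pvFindCL, List.getD_cons_zero]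
      split
      · rfl
      · simpa using ih (k + 1) 0
    | succ j =>
      simp only [pvNextCL, List.getD_cons_succ, List.drop_succ_cons]
      rw [ih (k + 1) j]
      ring_nf

theorem pvGoA_eq_pvGoB (lines : List String) (pend : List String) (i : Nat) (res : List String) :
    pvGoA lines pend i res = pvGoB lines (pvNextCL lines 0) pend i res := by
  induction pend generalizing i res with
  | nil => rfl
  | cons raw rest ih =>
    simp only [pvGoA, pvGoB]
    cases h : pvToks raw with
    | nil => rfl
    | cons t0 ts =>
      by_cases hg : t0 = "GET".toList
      · subst hg
        cases ts with
        | nil => simp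
        | cons t1 _ => simpa using ih _ _
      · by_cases hp : t0 = "POST".toList ∨ t0 = "PUT".toList
        · cases ts with
          | nil => simp; split_ifs <;> simp_all
          | cons t1 _ =>
            have hor : t0 = "GET".toList ∨ t0 = "POST".toList ∨ t0 = "PUT".toList := Or.inr hp
            simp only [if_pos hor, if_neg hg, if_pos hp]
            rw [pvNextCL_getD lines 0 (i + 1), Nat.zero_add]
            cases hf : pvFindCL (lines.drop (i + 1)) (i + 1) with
            | none => simp [pvGetBody, hf]
            | some m =>
              cases hb : lines[m + 2]? with
              | none => simp [pvGetBody, hf, hb]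
              | some body =>
                simp only [pvGetBody, hf, hb, Option.map_some]
                exact ih _ _
        · have hng : ¬ (t0 = "GET".toList ∨ t0 = "POST".toList ∨ t0 = "PUT".toList) := by
            tauto
          simp only [if_neg hng, if_neg hg, if_neg hp]
          exact ih _ _

-- ===== VERDICT (by name: the statement is the Claim_ definition above) =====
theorem request_list_to_str_spec : Claim_equal_request_list_to_str := by
  intro lines _ _
  unfold Spec_request_list_to_str request_list_to_str request_list_to_str_alt
  rw [pvGoA_eq_pvGoB]
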